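-- pv_equiv track=rewrite | github.com/durga-206/List | Medium_problem-solving/numbers-moving.py | numbers_moving
-- ===== SOURCE A (Python) =====
-- def numbers_moving(li):
--     new1,new2=[],[]
--     for i in li:
--         if i<0:
--             new1.append(i)
--         else:
--             new2.append(i)
--     return new1+new2
-- ===== SOURCE B (Python) =====
-- def numbers_moving(li):
--     # Stable sort on the boolean key: negatives (False) before non-negatives (True),
--     # each group in original order.
--     return sorted(li, key=lambda x: x >= 0)
-- ===== Notes on version B (the rewrite author's own statement) =====
-- stated objective: idiomatic
-- what changed: Replaces the explicit two-accumulator partition loop with a single stable library sort keyed on the boolean x >= 0.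
import Mathlib
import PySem

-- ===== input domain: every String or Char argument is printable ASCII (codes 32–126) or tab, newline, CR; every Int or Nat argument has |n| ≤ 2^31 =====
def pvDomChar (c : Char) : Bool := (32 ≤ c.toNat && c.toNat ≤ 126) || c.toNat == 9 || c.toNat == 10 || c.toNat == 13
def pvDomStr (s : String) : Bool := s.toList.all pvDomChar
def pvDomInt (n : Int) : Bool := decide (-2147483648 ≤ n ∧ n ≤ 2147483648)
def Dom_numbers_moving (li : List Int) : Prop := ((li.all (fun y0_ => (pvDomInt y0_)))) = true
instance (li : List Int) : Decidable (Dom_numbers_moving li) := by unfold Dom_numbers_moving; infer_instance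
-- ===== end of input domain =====

-- B replaces A's explicit two-list partition loop with a single stable sort on the
-- boolean key x >= 0 (idiomatic; not faster).

-- ===== PORT A =====
-- literal port of A's loop: two accumulators, append per branch, concatenate at the end
def numbers_moving (li : List Int) : List Int :=
  let r := li.foldl
    (fun (acc : List Int × List Int) i =>
      if i < 0 then (acc.1 ++ [i], acc.2) else (acc.1, acc.2 ++ [i]))
    ([], [])
  r.1 ++ r.2

-- ===== PORT B =====
-- port of Source B: sorted(li, key=lambda x: x >= 0) — PySem's stable sort, Bool key
def numbers_moving_alt (li : List Int) : List Int :=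
  PySem.List.sorted li (fun x => decide (0 ≤ x)) false

-- ===== PRECONDITION & SPEC =====
def Spec_numbers_moving (li : List Int) (out : List Int) : Prop := out = numbers_moving_alt li
instance (li : List Int) (out : List Int) : Decidable (Spec_numbers_moving li out) := by unfold Spec_numbers_moving; infer_instance

-- ===== CLAIM (what is proved, stated in full; the proofs are below) =====
def Claim_equal_numbers_moving : Prop := ∀ (li : List Int), Dom_numbers_moving li → Spec_numbers_moving li (numbers_moving li)

-- ===== LEMMAS AND PROOFS =====

-- A's foldl with both accumulators generalized: it computes the two filters.
theorem numbers_moving_foldl (li n1 n2 : List Int) :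
    li.foldl
      (fun (acc : List Int × List Int) i =>
        if i < 0 then (acc.1 ++ [i], acc.2) else (acc.1, acc.2 ++ [i]))
      (n1, n2)
    = (n1 ++ li.filter (fun x => decide (x < 0)),
       n2 ++ li.filter (fun x => decide (0 ≤ x))) := by
  induction li generalizing n1 n2 with
  | nil => simp
  | cons a t ih =>
    by_cases h : a < 0
    · simp [List.foldl_cons, h, ih, show ¬(0 ≤ a) by omega]
    · simp [List.foldl_cons, h, ih, show (0 ≤ a) by omega]

-- inserting a negative element into (negatives ++ nonnegatives) lands at the end of the negatives
theorem insertBy_neg_mid (x : Int) (hx : x < 0) :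
    ∀ (N P : List Int), (∀ y ∈ N, y < 0) → (∀ y ∈ P, 0 ≤ y) →
    PySem.List.insertBy
      (fun a b => decide ((decide (0 ≤ a) : Bool) < (decide (0 ≤ b) : Bool))) x (N ++ P)
    = N ++ x :: P := by
  intro N
  induction N with
  | nil =>
    intro P _ hP
    cases P with
    | nil => simp [PySem.List.insertBy]
    | cons p ps =>
      have hp : (0:Int) ≤ p := hP p (by simp)
      simp [PySem.List.insertBy, show ¬(0 ≤ x) by omega, hp]
  | cons n N ih =>
    intro P hN hP
    have hn : n < 0 := hN n (by simp)
    simp only [List.cons_append, PySem.List.insertBy,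
      show ¬((0:Int) ≤ n) by omega, show ¬((0:Int) ≤ x) by omega]
    simp [ih P (fun y hy => hN y (by simp [hy])) hP,
      show ¬((0:Int) ≤ n) by omega, show ¬((0:Int) ≤ x) by omega]

-- B's stable sort, written as its foldl-of-insertBy form, maintains the partitioned accumulator
theorem sort_foldl_split (li : List Int) :
    ∀ (N P : List Int), (∀ y ∈ N, y < 0) → (∀ y ∈ P, 0 ≤ y) →
    li.foldl
      (fun acc x =>
        PySem.List.insertBy
          (fun a b => decide ((decide (0 ≤ a) : Bool) < (decide (0 ≤ b) : Bool))) x acc)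
      (N ++ P)
    = (N ++ li.filter (fun x => decide (x < 0))) ++ (P ++ li.filter (fun x => decide (0 ≤ x))) := by
  induction li with
  | nil => intro N P _ _; simp
  | cons a t ih =>
    intro N P hN hP
    by_cases h : a < 0
    · have hN' : ∀ y ∈ N ++ [a], y < 0 := by
        intro y hy; rcases List.mem_append.mp hy with h' | h'
        · exact hN y h'
        · simp at h'; omega
      rw [List.foldl_cons, insertBy_neg_mid a h N P hN hP,
        show N ++ a :: P = (N ++ [a]) ++ P by simp, ih (N ++ [a]) P hN' hP]
      simp [h, show ¬((0:Int) ≤ a) by omega]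
    · have hP' : ∀ y ∈ P ++ [a], 0 ≤ y := by
        intro y hy; rcases List.mem_append.mp hy with h' | h'
        · exact hP y h'
        · simp at h'; omega
      have hnb : ∀ y ∈ N ++ P,
          (fun b c => decide ((decide (0 ≤ b) : Bool) < (decide (0 ≤ c) : Bool))) a y = false := by
        intro y _; simp [show ((0:Int) ≤ a) by omega]
      rw [List.foldl_cons, PySem.List.insertBy_of_forall_not_before _ a (N ++ P) hnb,
        show (N ++ P) ++ [a] = N ++ (P ++ [a]) by simp, ih N (P ++ [a]) hN hP']
      simp [h, show ((0:Int) ≤ a) by omega]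

-- ===== VERDICT (by name: the statement is the Claim_ definition above) =====
theorem numbers_moving_spec : Claim_equal_numbers_moving := by
  intro li _
  unfold Spec_numbers_moving numbers_moving numbers_moving_alt
  rw [PySem.List.sorted_eq_foldl_insertBy]
  have h := sort_foldl_split li [] [] (by simp) (by simp)
  simp only [List.nil_append] at h
  rw [h, numbers_moving_foldl]
  simp
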